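-- pv_equiv track=rewrite | github.com/loekajesse/Practice | CreatePhonenumber.py | create_phone_number1
-- ===== SOURCE A (Python) =====
-- def create_phone_number1(n):
--     x = 0
--     phone_number = ""
--     for i in n:
--         x += 1
--         phone_number += f"{i}"
--         if x == 2:
--             phone_number += "-"
--         # if x == 6:
--         #     phone_number += ""
--         if x == 10:
--            return phone_number
-- ===== SOURCE B (Python) =====
-- from itertools import islice
--
-- def create_phone_number1(n):
--     first = list(islice(iter(n), 10))
--     if len(first) < 10:
--         return None
--     parts = [f"{i}" for i in first]
--     return ''.join(parts[:2]) + '-' + ''.join(parts[2:])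
-- ===== Notes on version B (the rewrite author's own statement) =====
-- stated objective: simpler
-- what changed: Replaces the running counter and in-loop dash/return branches with: materialize the first 10 items (islice), return None if fewer, and assemble the result by joining the first two and last eight formatted items around a fixed dash.
import Mathlib
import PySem

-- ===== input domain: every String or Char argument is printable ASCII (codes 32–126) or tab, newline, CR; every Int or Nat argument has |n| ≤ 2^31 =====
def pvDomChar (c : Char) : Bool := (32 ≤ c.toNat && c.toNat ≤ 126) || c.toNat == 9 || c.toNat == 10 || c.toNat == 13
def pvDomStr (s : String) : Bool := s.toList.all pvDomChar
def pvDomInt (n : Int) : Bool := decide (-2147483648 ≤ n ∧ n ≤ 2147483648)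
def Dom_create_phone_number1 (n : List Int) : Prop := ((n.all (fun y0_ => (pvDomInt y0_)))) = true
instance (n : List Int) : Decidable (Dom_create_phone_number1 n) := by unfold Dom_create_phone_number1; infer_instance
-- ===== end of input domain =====

-- B replaces A's running counter and in-loop dash/early-return branches by taking the
-- first 10 items and assembling the string around a fixed dash (objective: simpler).


-- ===== PORT A =====
-- loop state: x (counter) and phone_number (accumulated string); falling off the loop yields none
def cpnA_go (l : List Int) (x : Int) (phone_number : String) : Option String :=
  match l with
  | [] => none
  | i :: rest =>
      let x := x + 1
      let phone_number := phone_number ++ PySem.Int.toStr i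
      let phone_number := if x == 2 then phone_number ++ "-" else phone_number
      if x == 10 then some phone_number else cpnA_go rest x phone_number

def create_phone_number1 (n : List Int) : Option String := cpnA_go n 0 ""

-- ===== PORT B =====
def create_phone_number1_alt (n : List Int) : Option String :=
  let first := n.take 10
  if first.length < 10 then none
  else
    let parts := first.map PySem.Int.toStr
    some (String.join (parts.take 2) ++ "-" ++ String.join (parts.drop 2))

-- ===== PRECONDITION & SPEC =====
def Spec_create_phone_number1 (n : List Int) (out : Option String) : Prop := out = create_phone_number1_alt n
instance (n : List Int) (out : Option String) : Decidable (Spec_create_phone_number1 n out) := by unfold Spec_create_phone_number1; infer_instance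

-- ===== CLAIM (what is proved, stated in full; the proofs are below) =====
def Claim_equal_create_phone_number1 : Prop := ∀ (n : List Int), Dom_create_phone_number1 n → Spec_create_phone_number1 n (create_phone_number1 n)

-- ===== LEMMAS AND PROOFS =====

theorem create_phone_number1_eq_alt (n : List Int) :
    create_phone_number1 n = create_phone_number1_alt n := by
  obtain _ | ⟨a, _ | ⟨b, _ | ⟨c, _ | ⟨d, _ | ⟨e, _ | ⟨f, _ | ⟨g, _ | ⟨h, _ | ⟨i, _ | ⟨j, rest⟩⟩⟩⟩⟩⟩⟩⟩⟩⟩ := n <;>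
    simp [create_phone_number1, cpnA_go, create_phone_number1_alt, String.join,
          String.append_assoc]

-- ===== VERDICT (by name: the statement is the Claim_ definition above) =====
theorem create_phone_number1_spec : Claim_equal_create_phone_number1 := by
  intro n _
  exact create_phone_number1_eq_alt n
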